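-- pv_equiv track=rewrite | github.com/waveform80/dotfiles | mergedch.py | split_entries
-- ===== SOURCE A (Python) =====
-- def split_entries(source, delimiter='### END ###'):
--     entry = []
--     for line in source:
--         line = line.rstrip()
--         if line == delimiter:
--             if entry:
--                 yield entry
--             entry = []
--         else:
--             entry.append(line)
--     if entry:
--         yield entry
-- ===== SOURCE B (Python) =====
-- def split_entries(source, delimiter='### END ###'):
--     lines = [line.rstrip() for line in source]
--
--     def split(lines):
--         if not lines:
--             return []
--         try:
--             i = lines.index(delimiter)
--         except ValueError:
--             return [lines]
--         head, rest = lines[:i], lines[i + 1:]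
--         out = split(rest)
--         return [head] + out if head else out
--
--     return split(lines)
-- ===== Notes on version B (the rewrite author's own statement) =====
-- stated objective: alternative
-- what changed: Replaced the single-pass accumulator-with-flush loop by a pre-stripped list that is split recursively at the first delimiter occurrence using list.index and slicing; the entry accumulator and reset/flush control flow disappear.
import Mathlib
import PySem

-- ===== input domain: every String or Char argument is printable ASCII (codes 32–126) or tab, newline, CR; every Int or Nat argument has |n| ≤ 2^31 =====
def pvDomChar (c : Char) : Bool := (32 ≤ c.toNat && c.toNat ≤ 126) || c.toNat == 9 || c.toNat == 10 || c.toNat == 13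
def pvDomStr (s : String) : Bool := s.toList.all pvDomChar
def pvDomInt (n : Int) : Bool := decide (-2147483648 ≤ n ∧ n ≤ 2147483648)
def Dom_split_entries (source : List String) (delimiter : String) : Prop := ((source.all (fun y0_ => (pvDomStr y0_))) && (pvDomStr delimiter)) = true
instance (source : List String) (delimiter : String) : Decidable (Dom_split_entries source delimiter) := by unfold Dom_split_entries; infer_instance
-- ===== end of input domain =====

-- B recursively splits a pre-stripped list at the first delimiter; A accumulates and flushes.
-- Equivalence of the RETURN value (A is a generator; its yielded sequence is the list compared).

-- ===== PORT A =====
-- one loop step of A on a (yielded, entry) state; rstrip applied as in A's loop body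
def pvStepA (delimiter : String) (st : List (List String) × List String) (line : String) :
    List (List String) × List String :=
  let line := PySem.Str.rstrip line
  if line = delimiter then
    (if st.2 ≠ [] then st.1 ++ [st.2] else st.1, [])
  else
    (st.1, st.2 ++ [line])

def split_entries (source : List String) (delimiter : String) : List (List String) :=
  let s := source.foldl (pvStepA delimiter) ([], [])
  if s.2 ≠ [] then s.1 ++ [s.2] else s.1

-- ===== PORT B =====
-- Source B's inner `split`: recursion on the first occurrence of the delimiter (list.index / slices)
def pvSplitB (delimiter : String) (lines : List String) : List (List String) :=
  if _hne : lines = [] then []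
  else
    match hidx : PySem.List.index? lines delimiter with
    | none => [lines]
    | some i =>
      let head := PySem.List.slice lines none (some (i : Int))
      let rest := PySem.List.slice lines (some ((i : Int) + 1)) none
      let out := pvSplitB delimiter rest
      if head ≠ [] then head :: out else out
termination_by lines.length
decreasing_by
  have : ((i : Int) + 1) = ((i + 1 : Nat) : Int) := by push_cast; ring
  simp only [this, PySem.List.slice_from_natCast, List.length_drop]
  have : 0 < lines.length := List.length_pos_iff.mpr _hne
  omega

def split_entries_alt (source : List String) (delimiter : String) : List (List String) :=
  pvSplitB delimiter (source.map PySem.Str.rstrip)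

-- ===== PRECONDITION & SPEC =====
def Spec_split_entries (source : List String) (delimiter : String) (out : List (List String)) : Prop := out = split_entries_alt source delimiter
instance (source : List String) (delimiter : String) (out : List (List String)) : Decidable (Spec_split_entries source delimiter out) := by unfold Spec_split_entries; infer_instance

-- ===== CLAIM (what is proved, stated in full; the proofs are below) =====
def Claim_equal_split_entries : Prop := ∀ (source : List String) (delimiter : String), Dom_split_entries source delimiter → Spec_split_entries source delimiter (split_entries source delimiter)

-- ===== LEMMAS AND PROOFS =====

-- A's loop step on an already-stripped line (pvStepA with rstrip factored out)
def pvStepS (d : String) (st : List (List String) × List String) (l : String) :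
    List (List String) × List String :=
  if l = d then (if st.2 ≠ [] then st.1 ++ [st.2] else st.1, []) else (st.1, st.2 ++ [l])

-- A's loop on an already-stripped stream, written as recursion (entry, remaining lines)
def pvGA (d : String) (entry : List String) : List String → List (List String)
  | [] => if entry ≠ [] then [entry] else []
  | l :: ls =>
      if l = d then
        (if entry ≠ [] then entry :: pvGA d [] ls else pvGA d [] ls)
      else pvGA d (entry ++ [l]) ls

-- characterization of pvGA via the first delimiter position
def pvChar (d : String) (entry : List String) (ls : List String) : List (List String) :=
  match PySem.List.index? ls d with
  | none => if entry ++ ls ≠ [] then [entry ++ ls] else []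
  | some i =>
      if entry ++ ls.take i ≠ [] then (entry ++ ls.take i) :: pvSplitB d (ls.drop (i + 1))
      else pvSplitB d (ls.drop (i + 1))

-- the stripped step applied to an already-stripped line equals the raw branch
lemma pvL1 (d : String) (ls : List String) :
    ∀ acc entry,
      (let s := ls.foldl (pvStepS d) (acc, entry);
        if s.2 ≠ [] then s.1 ++ [s.2] else s.1) = acc ++ pvGA d entry ls := by
  induction ls with
  | nil => intro acc entry; simp [pvGA]; split_ifs <;> simp
  | cons l ls ih =>
    intro acc entry
    rw [List.foldl_cons]
    by_cases hl : l = d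
    · by_cases he : entry ≠ []
      · have hstep : pvStepS d (acc, entry) l = (acc ++ [entry], []) := by
          simp [pvStepS, hl, he]
        rw [hstep, ih]
        simp [pvGA, hl, he]
      · have hstep : pvStepS d (acc, entry) l = (acc, []) := by
          simp only [pvStepS, if_pos hl]; rw [if_neg he]
        rw [hstep, ih]
        simp [pvGA, hl, he]
    · have hstep : pvStepS d (acc, entry) l = (acc, entry ++ [l]) := by
        simp [pvStepS, hl]
      rw [hstep, ih]
      simp [pvGA, hl]

-- pvChar with empty entry IS one unfolding of pvSplitB
lemma pvL3 (d : String) (ls : List String) : pvChar d [] ls = pvSplitB d ls := by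
  rw [pvSplitB]
  by_cases hne : ls = []
  · subst hne; simp [pvChar, PySem.List.index?]
  · simp only [dif_neg hne, pvChar]
    cases hidx : PySem.List.index? ls d with
    | none => simp [hne]
    | some i =>
      have h1 : PySem.List.slice ls none (some (i : Int)) = ls.take i :=
        PySem.List.slice_to_natCast ls i
      have h2 : PySem.List.slice ls (some ((i : Int) + 1)) none = ls.drop (i + 1) := by
        have : ((i : Int) + 1) = ((i + 1 : Nat) : Int) := by push_cast; ring
        rw [this, PySem.List.slice_from_natCast]
      simp only [h1, h2, List.nil_append]

lemma pvL2 (d : String) (ls : List String) :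
    ∀ entry, pvGA d entry ls = pvChar d entry ls := by
  induction ls with
  | nil =>
    intro entry
    simp [pvGA, pvChar, PySem.List.index?]
  | cons l ls ih =>
    intro entry
    by_cases hl : l = d
    · subst hl
      have hidx : PySem.List.index? (l :: ls) l = some 0 := PySem.List.index?_cons_self l ls
      have hg : pvGA l [] ls = pvSplitB l ls := by rw [ih [], pvL3]
      simp only [pvGA, pvChar, hidx]
      simp [hg]
    · have hidx : PySem.List.index? (l :: ls) d = (PySem.List.index? ls d).map (· + 1) :=
        PySem.List.index?_cons_of_ne ls hl
      simp only [pvGA, if_neg hl, ih (entry ++ [l]), pvChar, hidx]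
      cases h : PySem.List.index? ls d with
      | none =>
        simp only [Option.map_none]
        have h2 : entry ++ l :: ls ≠ [] := by simp
        simp [h2]
      | some i =>
        simp only [Option.map_some, List.take_succ_cons, List.drop_succ_cons]
        have h2 : entry ++ l :: ls.take i ≠ [] := by simp
        simp [h2]

-- ===== VERDICT (by name: the statement is the Claim_ definition above) =====
theorem split_entries_spec : Claim_equal_split_entries := by
  intro source delimiter _
  show split_entries source delimiter = split_entries_alt source delimiter
  unfold split_entries split_entries_alt
  have hmap : source.foldl (pvStepA delimiter) ([], []) =
      (source.map PySem.Str.rstrip).foldl (pvStepS delimiter) ([], []) := by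
    rw [List.foldl_map]; rfl
  rw [hmap]
  have := pvL1 delimiter (source.map PySem.Str.rstrip) [] []
  simp only [List.nil_append] at this
  rw [this, pvL2, pvL3]
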